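-- pv_equiv track=rewrite | github.com/kubistika/mbe-solutions | lab06/lab6B.py | _get_matching_inputs
-- ===== SOURCE A (Python) =====
-- def _get_matching_inputs(current: int, wanted: int):
--     xor_diff = current ^ wanted
--     x = 0
--     y = 0
--
--     # Initialize x and y byte by byte
--     for i in range(4):  # 32-byte numbers
--         curr_byte = (xor_diff >> (8 * i)) & 0xFF
--
--         # Generate x and y byte by byte
--         # Ensure no 0x00 in either x or y
--         if curr_byte == 0x00:
--             x_byte = 0x01
--             y_byte = 0x01
--         else:
--             x_byte = 0x01
--             y_byte = curr_byte ^ x_byte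
--
--         # Assemble x and y by shifting their bytes into position
--         x |= x_byte << (8 * i)
--         y |= y_byte << (8 * i)
--
--     return x, y
-- ===== SOURCE B (Python) =====
-- def _get_matching_inputs(current: int, wanted: int):
--     # Closed form: every x byte is 0x01 and every y byte is curr_byte ^ 0x01
--     # (also when curr_byte == 0, since 0 ^ 0x01 == 0x01), over the 4 bytes read.
--     diff = (current ^ wanted) & 0xFFFFFFFF
--     return 0x01010101, diff ^ 0x01010101
-- ===== Notes on version B (the rewrite author's own statement) =====
-- stated objective: simpler
-- what changed: Replaced the 4-iteration per-byte loop (shift, mask, branch, reassemble) by a closed form: x is always 0x01010101 and y is the 32-bit-masked xor difference xored with 0x01010101, since each y byte equals curr_byte ^ 0x01 in both branches.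
import Mathlib
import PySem

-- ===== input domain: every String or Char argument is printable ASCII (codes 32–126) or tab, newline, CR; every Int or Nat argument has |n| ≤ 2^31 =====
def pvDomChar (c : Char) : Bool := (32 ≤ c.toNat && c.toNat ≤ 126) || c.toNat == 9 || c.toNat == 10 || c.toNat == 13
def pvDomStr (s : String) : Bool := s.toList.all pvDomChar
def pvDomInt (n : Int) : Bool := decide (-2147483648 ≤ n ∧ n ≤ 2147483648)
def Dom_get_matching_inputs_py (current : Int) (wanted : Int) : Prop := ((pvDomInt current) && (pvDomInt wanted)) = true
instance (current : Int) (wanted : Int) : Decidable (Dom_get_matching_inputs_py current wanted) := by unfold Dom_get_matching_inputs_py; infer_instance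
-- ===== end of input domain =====

-- B replaces A's 4-iteration per-byte loop by the closed form (0x01010101, ((current ^ wanted) & 0xFFFFFFFF) ^ 0x01010101); objective: simpler.

-- ===== PORT A =====
-- literal transliteration of A's loop; the shift amount 8*i is a nonnegative int
-- (i ranges over range(4)), so `.toNat` is exact for Python's `>>`/`<<` here.
def get_matching_inputs_py (current : Int) (wanted : Int) : Int × Int :=
  let xor_diff := PySem.Int.bxor current wanted
  (PySem.List.pyRange 0 4 1).foldl
    (fun (st : Int × Int) (i : Int) =>
      let curr_byte := PySem.Int.band (xor_diff >>> (8 * i).toNat) 255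
      let xy :=
        if curr_byte = 0 then ((1 : Int), (1 : Int))
        else ((1 : Int), PySem.Int.bxor curr_byte 1)
      (PySem.Int.bor st.1 (xy.1 <<< (8 * i).toNat), PySem.Int.bor st.2 (xy.2 <<< (8 * i).toNat)))
    (0, 0)

-- ===== PORT B =====
def get_matching_inputs_py_alt (current : Int) (wanted : Int) : Int × Int :=
  let diff := PySem.Int.band (PySem.Int.bxor current wanted) 4294967295
  (16843009, PySem.Int.bxor diff 16843009)

-- ===== PRECONDITION & SPEC =====
def Spec_get_matching_inputs_py (current : Int) (wanted : Int) (out : Int × Int) : Prop := out = get_matching_inputs_py_alt current wanted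
instance (current : Int) (wanted : Int) (out : Int × Int) : Decidable (Spec_get_matching_inputs_py current wanted out) := by unfold Spec_get_matching_inputs_py; infer_instance

-- ===== CLAIM (what is proved, stated in full; the proofs are below) =====
def Claim_equal_get_matching_inputs_py : Prop := ∀ (current : Int) (wanted : Int), Dom_get_matching_inputs_py current wanted → Spec_get_matching_inputs_py current wanted (get_matching_inputs_py current wanted)

-- ===== LEMMAS AND PROOFS =====

-- the two branches of A's `if` coincide: 0x00 ^ 0x01 = 0x01
theorem pv_if_collapse (c : Int) :
    (if c = 0 then ((1 : Int), (1 : Int)) else ((1 : Int), PySem.Int.bxor c 1))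
      = (1, PySem.Int.bxor c 1) := by
  split_ifs with h
  · subst h; decide
  · rfl

theorem pv_band255 (a : Int) : PySem.Int.band a 255 = a % 256 := by
  simp only [PySem.Int.band]
  split_ifs with ha hb hb
  · rw [show ((255 : Int)).toNat = 255 from rfl, show (255 : Nat) = 2 ^ 8 - 1 from rfl,
      Nat.and_two_pow_sub_one_eq_mod]
    have hp : (2 : Nat) ^ 8 = 256 := by norm_num
    rw [hp]; omega
  · norm_num at hb
  · rw [show ((255 : Int)).toNat = 255 from rfl, show (255 : Nat) = 2 ^ 8 - 1 from rfl,
      Nat.and_comm, Nat.and_two_pow_sub_one_eq_mod]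
    have hp : (2 : Nat) ^ 8 = 256 := by norm_num
    rw [hp]; omega
  · norm_num at hb

theorem pv_band32 (a : Int) : PySem.Int.band a 4294967295 = a % 4294967296 := by
  simp only [PySem.Int.band]
  split_ifs with ha hb hb
  · rw [show ((4294967295 : Int)).toNat = 4294967295 from rfl,
      show (4294967295 : Nat) = 2 ^ 32 - 1 from rfl, Nat.and_two_pow_sub_one_eq_mod]
    have hp : (2 : Nat) ^ 32 = 4294967296 := by norm_num
    rw [hp]; omega
  · norm_num at hb
  · rw [show ((4294967295 : Int)).toNat = 4294967295 from rfl,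
      show (4294967295 : Nat) = 2 ^ 32 - 1 from rfl, Nat.and_comm,
      Nat.and_two_pow_sub_one_eq_mod]
    have hp : (2 : Nat) ^ 32 = 4294967296 := by norm_num
    rw [hp]; omega
  · norm_num at hb

theorem pv_shl_cast (m k : Nat) : ((m : Int) <<< k) = ((m <<< k : Nat) : Int) := by simp

theorem pv_tb1 (k : Nat) : Nat.testBit 1 k = decide (k = 0) := by
  cases k with
  | zero => simp
  | succ n => simp [Nat.testBit_succ]

theorem pv_tbC (k : Nat) : Nat.testBit 16843009 k =
    (decide (k = 0) || decide (k = 8) || decide (k = 16) || decide (k = 24)) := by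
  rw [show (16843009 : Nat) = (((2 ^ 0 ||| 2 ^ 8) ||| 2 ^ 16) ||| 2 ^ 24) from by decide]
  simp only [Nat.testBit_or, Nat.testBit_two_pow]
  simp [eq_comm]

-- byte-wise reassembly equals masked xor, over Nat, by testBit extensionality
theorem pv_key (N : Nat) (h : N < 4294967296) :
    ((((N % 256 ^^^ 1) ||| ((N / 256 % 256 ^^^ 1) <<< 8)) ||| ((N / 65536 % 256 ^^^ 1) <<< 16))
        ||| ((N / 16777216 % 256 ^^^ 1) <<< 24))
      = N ^^^ 16843009 := by
  apply Nat.eq_of_testBit_eq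
  intro j
  by_cases hj : j < 32
  · simp only [show (256 : Nat) = 2 ^ 8 from rfl, show (65536 : Nat) = 2 ^ 16 from rfl,
      show (16777216 : Nat) = 2 ^ 24 from rfl]
    interval_cases j <;>
      simp only [Nat.testBit_or, Nat.testBit_xor, Nat.testBit_shiftLeft, Nat.testBit_mod_two_pow,
        Nat.testBit_div_two_pow, pv_tb1, pv_tbC, Bool.xor_true, decide_true] <;> simp
  · have hb0 : N % 256 ^^^ 1 < 2 ^ 8 :=
      Nat.xor_lt_two_pow (by exact Nat.mod_lt _ (by norm_num)) (by norm_num)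
    have hb1 : N / 256 % 256 ^^^ 1 < 2 ^ 8 :=
      Nat.xor_lt_two_pow (by exact Nat.mod_lt _ (by norm_num)) (by norm_num)
    have hb2 : N / 65536 % 256 ^^^ 1 < 2 ^ 8 :=
      Nat.xor_lt_two_pow (by exact Nat.mod_lt _ (by norm_num)) (by norm_num)
    have hb3 : N / 16777216 % 256 ^^^ 1 < 2 ^ 8 :=
      Nat.xor_lt_two_pow (by exact Nat.mod_lt _ (by norm_num)) (by norm_num)
    have hs0 : N % 256 ^^^ 1 < 2 ^ 32 := lt_of_lt_of_le hb0 (by norm_num)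
    have hs1 : (N / 256 % 256 ^^^ 1) <<< 8 < 2 ^ 32 := by
      rw [Nat.shiftLeft_eq]; norm_num at hb1 ⊢; omega
    have hs2 : (N / 65536 % 256 ^^^ 1) <<< 16 < 2 ^ 32 := by
      rw [Nat.shiftLeft_eq]; norm_num at hb2 ⊢; omega
    have hs3 : (N / 16777216 % 256 ^^^ 1) <<< 24 < 2 ^ 32 := by
      rw [Nat.shiftLeft_eq]; norm_num at hb3 ⊢; omega
    have hL := Nat.or_lt_two_pow (Nat.or_lt_two_pow (Nat.or_lt_two_pow hs0 hs1) hs2) hs3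
    have h32 : N < 2 ^ 32 := by
      have e : (2 : Nat) ^ 32 = 4294967296 := by norm_num
      omega
    have hR : N ^^^ 16843009 < 2 ^ 32 := Nat.xor_lt_two_pow h32 (by norm_num)
    have hpj : (2 : Nat) ^ 32 ≤ 2 ^ j := Nat.pow_le_pow_right (by norm_num) (by omega)
    rw [Nat.testBit_lt_two_pow (lt_of_lt_of_le hL hpj),
      Nat.testBit_lt_two_pow (lt_of_lt_of_le hR hpj)]

-- ===== VERDICT (by name: the statement is the Claim_ definition above) =====
theorem get_matching_inputs_py_spec : Claim_equal_get_matching_inputs_py := by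
  intro current wanted _
  show get_matching_inputs_py current wanted = get_matching_inputs_py_alt current wanted
  have hr : PySem.List.pyRange 0 4 1 = [0, 1, 2, 3] := by decide
  simp only [get_matching_inputs_py, get_matching_inputs_py_alt, hr, List.foldl, pv_if_collapse]
  generalize PySem.Int.bxor current wanted = d
  rw [Prod.mk.injEq]
  have t0 : ((8 : Int) * 0).toNat = 0 := by decide
  have t1 : ((8 : Int) * 1).toNat = 8 := by decide
  have t2 : ((8 : Int) * 2).toNat = 16 := by decide
  have t3 : ((8 : Int) * 3).toNat = 24 := by decide
  rw [t0, t1, t2, t3]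
  constructor
  · decide
  · have e0 : d >>> (0 : Nat) = d := by rw [Int.shiftRight_eq_div_pow]; norm_num
    have e8 : d >>> (8 : Nat) = d / 256 := by rw [Int.shiftRight_eq_div_pow]; norm_num
    have e16 : d >>> (16 : Nat) = d / 65536 := by rw [Int.shiftRight_eq_div_pow]; norm_num
    have e24 : d >>> (24 : Nat) = d / 16777216 := by rw [Int.shiftRight_eq_div_pow]; norm_num
    rw [e0, e8, e16, e24, pv_band255 d, pv_band255 (d / 256), pv_band255 (d / 65536),
      pv_band255 (d / 16777216), pv_band32 d]
    have hnn : 0 ≤ d % 4294967296 := by omega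
    have hcast : d % 4294967296 = ((d % 4294967296).toNat : Int) := by omega
    set N := (d % 4294967296).toNat with hNdef
    have h1 : d % 256 = ((N % 256 : Nat) : Int) := by omega
    have h2 : d / 256 % 256 = ((N / 256 % 256 : Nat) : Int) := by omega
    have h3 : d / 65536 % 256 = ((N / 65536 % 256 : Nat) : Int) := by omega
    have h4 : d / 16777216 % 256 = ((N / 16777216 % 256 : Nat) : Int) := by omega
    rw [h1, h2, h3, h4, hcast]
    simp only [show ((1 : Int)) = ((1 : Nat) : Int) from rfl,
      show ((0 : Int)) = ((0 : Nat) : Int) from rfl,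
      show ((16843009 : Int)) = ((16843009 : Nat) : Int) from rfl,
      PySem.Int.bxor_natCast, PySem.Int.bor_natCast, pv_shl_cast]
    rw [Nat.cast_inj]
    have hz : (0 : Nat) ||| ((N % 256 ^^^ 1) <<< 0) = N % 256 ^^^ 1 := by
      simp [Nat.shiftLeft_zero]
    rw [hz]
    exact pv_key N (by omega)
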